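-- pv_equiv track=rewrite | github.com/Taeho25/Algorithm | Programmers/Lv.2/연속 부분 수열 합의 개수.py | solution
-- ===== SOURCE A (Python) =====
-- def solution(elements):
--     ele_len = len(elements)
--     answer = set(elements)  # 부분수열 길이가 1인 경우의 합으로 초기화
--     elements = elements * 2
--
--     for s in range(2, ele_len):
--         for i in range(ele_len):
--             ssum = sum(elements[s:s+i])  # 이중for문 + sum() -> O(N^3)
--             answer.add(ssum)
--
--     return len(answer) + 1
-- ===== SOURCE B (Python) =====
-- def solution(elements):
--     n = len(elements)
--     d = elements * 2
--     # prefix sums of the doubled list: P[k] = sum(d[:k])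
--     P = [0]
--     run = 0
--     for x in d:
--         run += x
--         P.append(run)
--     answer = set(elements)
--     for s in range(2, n):
--         for i in range(n):
--             answer.add(P[s + i] - P[s])
--     return len(answer) + 1
-- ===== Notes on version B (the rewrite author's own statement) =====
-- stated objective: faster
-- what changed: B precomputes prefix sums of the doubled list once, replacing A's per-slice sum() with an O(1) prefix-difference, dropping O(N^3) to O(N^2).
import Mathlib
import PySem

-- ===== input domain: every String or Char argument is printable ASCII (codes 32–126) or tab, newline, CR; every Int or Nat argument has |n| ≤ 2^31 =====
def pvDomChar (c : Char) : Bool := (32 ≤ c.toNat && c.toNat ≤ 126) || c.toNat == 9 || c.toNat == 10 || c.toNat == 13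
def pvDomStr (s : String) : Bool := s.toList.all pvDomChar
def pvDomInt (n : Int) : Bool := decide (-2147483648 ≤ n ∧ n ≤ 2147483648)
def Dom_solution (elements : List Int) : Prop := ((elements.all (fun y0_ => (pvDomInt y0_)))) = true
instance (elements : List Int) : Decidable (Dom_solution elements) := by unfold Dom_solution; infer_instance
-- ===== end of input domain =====

-- B replaces A's per-slice sum() with prefix sums of the doubled list computed once (O(n^3) -> O(n^2)).

-- ===== PORT A =====
def solution (elements : List Int) : Int :=
  let eleLen : Int := PySem.List.len elements
  let answer : PySem.Set Int := PySem.Set.ofList elements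
  let elements2 : List Int := elements ++ elements
  let answer :=
    (PySem.List.pyRange 2 eleLen 1).foldl (fun ans s =>
      (PySem.List.pyRange 0 eleLen 1).foldl (fun ans i =>
        ans.add ((PySem.List.slice elements2 (some s) (some (s + i))).sum)) ans) answer
  PySem.Set.len answer + 1

-- ===== PORT B =====
def solution_alt (elements : List Int) : Int :=
  let n : Int := PySem.List.len elements
  let d : List Int := elements ++ elements
  -- prefix-sum loop of Source B: carries (P, run)
  let st := d.foldl (fun (st : List Int × Int) x =>
      (st.1 ++ [st.2 + x], st.2 + x)) (([0] : List Int), (0 : Int))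
  let P := st.1
  let answer : PySem.Set Int := PySem.Set.ofList elements
  let answer :=
    (PySem.List.pyRange 2 n 1).foldl (fun ans s =>
      (PySem.List.pyRange 0 n 1).foldl (fun ans i =>
        ans.add (PySem.List.pyGetD P (s + i) 0 - PySem.List.pyGetD P s 0)) ans) answer
  PySem.Set.len answer + 1

-- ===== PRECONDITION & SPEC =====
def Spec_solution (elements : List Int) (out : Int) : Prop := out = solution_alt elements
instance (elements : List Int) (out : Int) : Decidable (Spec_solution elements out) := by unfold Spec_solution; infer_instance

-- ===== CLAIM (what is proved, stated in full; the proofs are below) =====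
def Claim_equal_solution : Prop := ∀ (elements : List Int), Dom_solution elements → Spec_solution elements (solution elements)

-- ===== LEMMAS AND PROOFS =====

/-- Running prefix-sum tails: `pref r l = [r+l0, r+l0+l1, …]`. -/
def pref (r : Int) : List Int → List Int
  | [] => []
  | x :: xs => (r + x) :: pref (r + x) xs

theorem pref_length (r : Int) (l : List Int) : (pref r l).length = l.length := by
  induction l generalizing r with
  | nil => rfl
  | cons x xs ih => simp [pref, ih]

theorem pref_getElem (l : List Int) (r : Int) (k : Nat) (hk : k < l.length) :
    (pref r l)[k]'(by rw [pref_length]; exact hk) = r + (l.take (k + 1)).sum := by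
  induction l generalizing r k with
  | nil => simp at hk
  | cons x xs ih =>
    cases k with
    | zero => simp [pref]
    | succ m =>
      have hm : m < xs.length := by simpa using hk
      simp only [pref, List.getElem_cons_succ, List.take_succ_cons, List.sum_cons]
      rw [ih (r + x) m hm]
      ring

theorem foldP (l : List Int) (acc : List Int) (r : Int) :
    (l.foldl (fun (st : List Int × Int) x => (st.1 ++ [st.2 + x], st.2 + x)) (acc, r)).1
      = acc ++ pref r l := by
  induction l generalizing acc r with
  | nil => simp [pref]
  | cons x xs ih =>
    simp only [List.foldl_cons]
    rw [ih]
    simp [pref]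

/-- The built prefix list indexed at `k ≤ l.length` gives `sum (take k)`. -/
theorem P_getElem (l : List Int) (k : Nat) (hk : k < l.length + 1) :
    ((0 : Int) :: pref 0 l)[k]'(by simp [pref_length]; omega) = (l.take k).sum := by
  cases k with
  | zero => simp
  | succ m =>
    have hm : m < l.length := by omega
    simpa using pref_getElem l 0 m hm

theorem slice_sum_eq (d : List Int) (s i : Int) (hs : 0 ≤ s) (hi : 0 ≤ i) :
    (PySem.List.slice d (some s) (some (s + i))).sum
      = (d.take (s + i).toNat).sum - (d.take s.toNat).sum := by
  rw [PySem.List.slice_toNat d hs (by omega : (0:Int) ≤ s + i)]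
  set j : Nat := (s + i).toNat - s.toNat with hj
  have h : (s + i).toNat = s.toNat + j := by omega
  rw [h, List.take_add, List.sum_append]
  ring

theorem solution_eq (elements : List Int) : solution elements = solution_alt elements := by
  unfold solution solution_alt
  simp only []
  set n : Int := PySem.List.len elements with hn
  set d : List Int := elements ++ elements with hd
  have hP : (d.foldl (fun (st : List Int × Int) x => (st.1 ++ [st.2 + x], st.2 + x))
      (([0] : List Int), (0 : Int))).1 = (0 : Int) :: pref 0 d := by
    simpa using foldP d [0] 0
  rw [hP]
  have hnlen : n = (elements.length : Int) := by simp [hn, PySem.List.len_eq]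
  have hdlen : d.length = 2 * elements.length := by simp [hd]; omega
  have hfold :
      (PySem.List.pyRange 2 n 1).foldl (fun ans s =>
        (PySem.List.pyRange 0 n 1).foldl (fun ans i =>
          PySem.Set.add ans ((PySem.List.slice d (some s) (some (s + i))).sum)) ans)
        (PySem.Set.ofList elements)
      = (PySem.List.pyRange 2 n 1).foldl (fun ans s =>
        (PySem.List.pyRange 0 n 1).foldl (fun ans i =>
          PySem.Set.add ans (PySem.List.pyGetD ((0 : Int) :: pref 0 d) (s + i) 0
            - PySem.List.pyGetD ((0 : Int) :: pref 0 d) s 0)) ans)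
        (PySem.Set.ofList elements) := by
    apply PySem.List.foldl_congr_mem
    intro ans s hs
    apply PySem.List.foldl_congr_mem
    intro ans' i hi
    rw [PySem.List.mem_pyRange_one] at hs hi
    congr 1
    -- both indices are in range of the prefix list
    have hlenP : ((0 : Int) :: pref 0 d).length = d.length + 1 := by simp [pref_length]
    have hsn : s < n := hs.2
    have hin : i < n := hi.2
    have h2s : 2 ≤ s := hs.1
    have h0i : 0 ≤ i := hi.1
    have hs0 : 0 ≤ s := by omega
    have hrange1 : s + i < (((0 : Int) :: pref 0 d).length : Int) := by
      rw [hlenP, hdlen] ; push_cast ; omega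
    have hrange2 : s < (((0 : Int) :: pref 0 d).length : Int) := by
      rw [hlenP, hdlen] ; push_cast ; omega
    have hk1 : (s + i).toNat < d.length + 1 := by
      have : s + i < (d.length : Int) + 1 := by rw [hdlen]; push_cast; omega
      omega
    have hk2 : s.toNat < d.length + 1 := by
      have : s < (d.length : Int) + 1 := by rw [hdlen]; push_cast; omega
      omega
    rw [PySem.List.pyGetD_eq_getElem _ _ (by omega) hrange1,
        PySem.List.pyGetD_eq_getElem _ _ hs0 hrange2]
    rw [P_getElem d (s + i).toNat hk1, P_getElem d s.toNat hk2]
    exact slice_sum_eq d s i hs0 h0i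
  rw [hfold]

-- ===== VERDICT (by name: the statement is the Claim_ definition above) =====
theorem solution_spec : Claim_equal_solution := by
  intro elements _
  unfold Spec_solution
  exact solution_eq elements
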